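-- pv_equiv track=rewrite | github.com/telesol/ladder | analyze_m_modular.py | check_n_relation
-- ===== SOURCE A (Python) =====
-- from typing import List, Dict, Tuple
--
-- def check_n_relation(residues: Dict[int, int], p: int) -> str:
--     """Check if m[n] mod p relates to n mod p"""
--
--     # Check if m[n] ≡ n (mod p)
--     if all(residues[n] == n % p for n in residues.keys()):
--         return f"m[n] ≡ n (mod {p})"
--
--     # Check if m[n] ≡ a*n (mod p) for some a
--     for a in range(p):
--         if all(residues[n] == (a * n) % p for n in residues.keys()):
--             return f"m[n] ≡ {a}*n (mod {p})"
--
--     # Check if m[n] ≡ a*n + b (mod p) for some a, b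
--     for a in range(p):
--         for b in range(p):
--             if all(residues[n] == (a * n + b) % p for n in residues.keys()):
--                 return f"m[n] ≡ {a}*n + {b} (mod {p})"
--
--     return None
-- ===== SOURCE B (Python) =====
-- def check_n_relation(residues, p):
--     """Check if m[n] mod p relates to n mod p.
--
--     Single fused scan: for each a the unique candidate b is forced by the
--     first datum ((m0 - a*n0) % p); one pass over a records the first affine
--     fit and returns early on the first purely-linear fit (b == 0).
--     O(p*N) instead of A's nested O(p^2*N)."""
--     keys = list(residues.keys())
--     if all(residues[n] == n % p for n in keys):
--         return f"m[n] ≡ n (mod {p})"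
--     # residues is nonempty here (otherwise the check above returned)
--     n0 = keys[0]
--     m0 = residues[n0]
--     aff = None  # first (a, b) fitting m[n] ≡ a*n + b (mod p)
--     for a in range(p):
--         b = (m0 - a * n0) % p
--         if all(residues[n] == (a * n + b) % p for n in keys):
--             if aff is None:
--                 aff = (a, b)
--             if b == 0:
--                 return f"m[n] ≡ {a}*n (mod {p})"
--     if aff is not None:
--         a, b = aff
--         return f"m[n] ≡ {a}*n + {b} (mod {p})"
--     return None
-- ===== Notes on version B (the rewrite author's own statement) =====
-- stated objective: faster
-- what changed: A's two separate a-loops (b=0 scan plus a nested O(p^2) (a,b) scan) are fused into one scan over a that computes the unique candidate b from the first datum ((m0 - a*n0) mod p), records the first affine fit in an accumulator and returns early on the first b = 0 fit.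
import Mathlib
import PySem

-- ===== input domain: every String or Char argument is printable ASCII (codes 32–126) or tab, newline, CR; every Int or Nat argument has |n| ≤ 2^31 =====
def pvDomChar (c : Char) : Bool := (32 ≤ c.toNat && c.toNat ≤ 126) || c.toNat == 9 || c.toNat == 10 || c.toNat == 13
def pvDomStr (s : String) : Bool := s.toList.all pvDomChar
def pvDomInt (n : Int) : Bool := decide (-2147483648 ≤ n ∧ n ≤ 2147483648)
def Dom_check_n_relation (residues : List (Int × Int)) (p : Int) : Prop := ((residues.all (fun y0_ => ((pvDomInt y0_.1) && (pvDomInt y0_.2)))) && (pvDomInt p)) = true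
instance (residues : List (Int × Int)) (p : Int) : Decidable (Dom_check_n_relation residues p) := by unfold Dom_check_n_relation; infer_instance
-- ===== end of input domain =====

-- B replaces A's three staged loops (identity check, b=0 scan, nested O(p^2*N)
-- (a,b) scan) by one fused scan over a: the unique candidate b is forced by the
-- first datum ((m0 - a*n0) mod p); the scan records the first affine fit and
-- returns early on the first b = 0 fit. O(p*N).

-- ===== PORT A =====
-- dict[int,int] as assoc list: keys() = distinct keys in insertion order, lookup = first match
def pvKeysA (residues : List (Int × Int)) : List Int := PySem.List.dedup (residues.map Prod.fst)
def pvGetA (residues : List (Int × Int)) (n : Int) : Int := (residues.lookup n).getD 0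
def pvAllA (residues : List (Int × Int)) (f : Int → Int) : Bool :=
  (pvKeysA residues).all (fun n => pvGetA residues n == f n)
def pvFmt1A (p : Int) : String := "m[n] ≡ n (mod " ++ PySem.Int.toStr p ++ ")"
def pvFmt2A (a p : Int) : String := "m[n] ≡ " ++ PySem.Int.toStr a ++ "*n (mod " ++ PySem.Int.toStr p ++ ")"
def pvFmt3A (a b p : Int) : String :=
  "m[n] ≡ " ++ PySem.Int.toStr a ++ "*n + " ++ PySem.Int.toStr b ++ " (mod " ++ PySem.Int.toStr p ++ ")"

-- 'for a in range(p): if all(residues[n] == (a*n) % p ...): return ...'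
def pvLoop2A (residues : List (Int × Int)) (p : Int) : List Int → Option String
  | [] => none
  | a :: as =>
    if pvAllA residues (fun n => PySem.Int.mod (a * n) p) then some (pvFmt2A a p)
    else pvLoop2A residues p as

-- inner 'for b in range(p): if all(residues[n] == (a*n+b) % p ...): return ...'
def pvLoop3InnerA (residues : List (Int × Int)) (p a : Int) : List Int → Option String
  | [] => none
  | b :: bs =>
    if pvAllA residues (fun n => PySem.Int.mod (a * n + b) p) then some (pvFmt3A a b p)
    else pvLoop3InnerA residues p a bs

def pvLoop3A (residues : List (Int × Int)) (p : Int) : List Int → Option String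
  | [] => none
  | a :: as =>
    match pvLoop3InnerA residues p a (PySem.List.pyRange 0 p 1) with
    | some s => some s
    | none => pvLoop3A residues p as

def check_n_relation (residues : List (Int × Int)) (p : Int) : Option String :=
  if pvAllA residues (fun n => PySem.Int.mod n p) then some (pvFmt1A p)
  else
    match pvLoop2A residues p (PySem.List.pyRange 0 p 1) with
    | some s => some s
    | none => pvLoop3A residues p (PySem.List.pyRange 0 p 1)

-- ===== PORT B =====
def pvKeysB (residues : List (Int × Int)) : List Int := PySem.List.dedup (residues.map Prod.fst)
def pvGetB (residues : List (Int × Int)) (n : Int) : Int := (residues.lookup n).getD 0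
-- 'all(residues[n] == (a*n+b) % p for n in keys)'
def pvFitB (residues : List (Int × Int)) (p a b : Int) : Bool :=
  (pvKeysB residues).all (fun n => pvGetB residues n == PySem.Int.mod (a * n + b) p)

-- the fused 'for a in range(p)' scan, carrying the first affine fit 'aff'
def pvScanB (residues : List (Int × Int)) (p n0 m0 : Int) (aff : Option (Int × Int)) :
    List Int → Option String
  | [] =>
    match aff with
    | some (a, b) =>
      some ("m[n] ≡ " ++ PySem.Int.toStr a ++ "*n + " ++ PySem.Int.toStr b ++
            " (mod " ++ PySem.Int.toStr p ++ ")")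
    | none => none
  | a :: as =>
    let b := PySem.Int.mod (m0 - a * n0) p
    if pvFitB residues p a b then
      let aff' := if aff.isNone then some (a, b) else aff
      if b == 0 then
        some ("m[n] ≡ " ++ PySem.Int.toStr a ++ "*n (mod " ++ PySem.Int.toStr p ++ ")")
      else pvScanB residues p n0 m0 aff' as
    else pvScanB residues p n0 m0 aff as

def check_n_relation_alt (residues : List (Int × Int)) (p : Int) : Option String :=
  let keys := pvKeysB residues
  if keys.all (fun n => pvGetB residues n == PySem.Int.mod n p) then
    some ("m[n] ≡ n (mod " ++ PySem.Int.toStr p ++ ")")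
  else
    match keys with
    | [] => none  -- unreachable: residues is nonempty here; totalizes Python's keys[0]
    | n0 :: _ => pvScanB residues p n0 (pvGetB residues n0) none (PySem.List.pyRange 0 p 1)

-- ===== PRECONDITION & SPEC =====
-- Pre_ excludes exactly p = 0 with a nonempty dict, where 'n % 0' makes A raise ZeroDivisionError.
def Pre_check_n_relation (residues : List (Int × Int)) (p : Int) : Prop := residues = [] ∨ p ≠ 0
instance (residues : List (Int × Int)) (p : Int) : Decidable (Pre_check_n_relation residues p) := by
  unfold Pre_check_n_relation; infer_instance
def pvWitness_check_n_relation : (List (Int × Int)) × Int := ([(1, 2)], 3)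

def Spec_check_n_relation (residues : List (Int × Int)) (p : Int) (out : Option String) : Prop := out = check_n_relation_alt residues p
instance (residues : List (Int × Int)) (p : Int) (out : Option String) : Decidable (Spec_check_n_relation residues p out) := by unfold Spec_check_n_relation; infer_instance

-- ===== CLAIM (what is proved, stated in full; the proofs are below) =====
def Claim_equal_check_n_relation : Prop := ∀ (residues : List (Int × Int)) (p : Int), Dom_check_n_relation residues p → Pre_check_n_relation residues p → Spec_check_n_relation residues p (check_n_relation residues p)

-- ===== LEMMAS AND PROOFS =====

theorem pvFitB_eq_all (residues : List (Int × Int)) (p a b : Int) :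
    pvFitB residues p a b = pvAllA residues (fun n => PySem.Int.mod (a * n + b) p) := rfl

-- the value b is forced by any single key: if the check passes with 0 ≤ b < p, then b = (m[k0] - a*k0) % p
theorem pv_b_unique (residues : List (Int × Int)) (p a b k0 : Int)
    (hk0 : k0 ∈ pvKeysA residues) (hp : 0 < p) (hb0 : 0 ≤ b) (hb1 : b < p)
    (hall : pvAllA residues (fun n => PySem.Int.mod (a * n + b) p) = true) :
    b = PySem.Int.mod (pvGetA residues k0 - a * k0) p := by
  have h := (List.all_eq_true.mp hall) k0 hk0
  have hm : pvGetA residues k0 = PySem.Int.mod (a * k0 + b) p := by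
    simpa using h
  rw [PySem.Int.mod_eq_emod_of_pos hp] at hm ⊢
  rw [hm]
  have hd : a * k0 + b - p * ((a * k0 + b) / p) - a * k0 = b + p * (-((a * k0 + b) / p)) := by ring
  rw [Int.emod_def (a * k0 + b) p, hd, Int.add_mul_emod_self_left, Int.emod_eq_of_lt hb0 hb1]

-- A's b = 0 check equals 'the forced b is 0 and the forced fit holds'
theorem pv_fit0_eq (residues : List (Int × Int)) (p n0 a : Int)
    (hk0 : n0 ∈ pvKeysA residues) (hp : 0 < p) :
    pvAllA residues (fun n => PySem.Int.mod (a * n) p) =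
      (pvFitB residues p a (PySem.Int.mod (pvGetA residues n0 - a * n0) p) &&
        (PySem.Int.mod (pvGetA residues n0 - a * n0) p == 0)) := by
  rw [Bool.eq_iff_iff, Bool.and_eq_true, beq_iff_eq, pvFitB_eq_all]
  constructor
  · intro h
    have h0 : pvAllA residues (fun n => PySem.Int.mod (a * n + 0) p) = true := by
      simpa using h
    have hb := pv_b_unique residues p a 0 n0 hk0 hp le_rfl hp h0
    refine ⟨?_, hb.symm⟩
    rw [← hb]; exact h0
  · rintro ⟨h, hz⟩
    rw [hz] at h
    simpa using h

theorem pvLoop2A_char (residues : List (Int × Int)) (p n0 : Int)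
    (hk0 : n0 ∈ pvKeysA residues) (hp : 0 < p) (as : List Int) :
    pvLoop2A residues p as =
      match as.find? (fun a => pvFitB residues p a (PySem.Int.mod (pvGetA residues n0 - a * n0) p) &&
                        (PySem.Int.mod (pvGetA residues n0 - a * n0) p == 0)) with
      | some a => some (pvFmt2A a p)
      | none => none := by
  induction as with
  | nil => rfl
  | cons a as ih =>
    rw [pvLoop2A, pv_fit0_eq residues p n0 a hk0 hp]
    by_cases hc : (pvFitB residues p a (PySem.Int.mod (pvGetA residues n0 - a * n0) p) &&
        (PySem.Int.mod (pvGetA residues n0 - a * n0) p == 0)) = true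
    · simp [hc]
    · rw [Bool.not_eq_true] at hc
      simpa [List.find?_cons, hc] using ih

theorem pvLoop3Inner_eq (residues : List (Int × Int)) (p a k0 : Int)
    (hk0 : k0 ∈ pvKeysA residues) (hp : 0 < p) (bs : List Int)
    (hbs : ∀ b ∈ bs, 0 ≤ b ∧ b < p) :
    pvLoop3InnerA residues p a bs =
      (if pvAllA residues
            (fun n => PySem.Int.mod (a * n + PySem.Int.mod (pvGetA residues k0 - a * k0) p) p) = true
          ∧ PySem.Int.mod (pvGetA residues k0 - a * k0) p ∈ bs
       then some (pvFmt3A a (PySem.Int.mod (pvGetA residues k0 - a * k0) p) p) else none) := by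
  induction bs with
  | nil => simp [pvLoop3InnerA]
  | cons b t ih =>
    have hb := hbs b (by simp)
    have ht : ∀ x ∈ t, 0 ≤ x ∧ x < p := fun x hx => hbs x (by simp [hx])
    by_cases hc : pvAllA residues (fun n => PySem.Int.mod (a * n + b) p) = true
    · have hbeq : b = PySem.Int.mod (pvGetA residues k0 - a * k0) p :=
        pv_b_unique residues p a b k0 hk0 hp hb.1 hb.2 hc
      rw [pvLoop3InnerA, if_pos hc, ← hbeq]
      simp [hc]
    · rw [pvLoop3InnerA, if_neg hc, ih ht]
      by_cases hc0 : pvAllA residues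
          (fun n => PySem.Int.mod (a * n + PySem.Int.mod (pvGetA residues k0 - a * k0) p) p) = true
      · have hne : PySem.Int.mod (pvGetA residues k0 - a * k0) p ≠ b := by
          intro he; rw [he] at hc0; exact hc hc0
        simp [hc0, List.mem_cons, hne]
      · simp [hc0]

theorem pvLoop3A_char (residues : List (Int × Int)) (p n0 : Int)
    (hk0 : n0 ∈ pvKeysA residues) (hp : 0 < p) (as : List Int) :
    pvLoop3A residues p as =
      match as.find? (fun a => pvFitB residues p a (PySem.Int.mod (pvGetA residues n0 - a * n0) p)) with
      | some a => some (pvFmt3A a (PySem.Int.mod (pvGetA residues n0 - a * n0) p) p)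
      | none => none := by
  induction as with
  | nil => rfl
  | cons a as ih =>
    have hbnd : ∀ b ∈ PySem.List.pyRange 0 p 1, 0 ≤ b ∧ b < p := by
      intro b hb
      have := (PySem.List.mem_pyRange_one).mp hb
      exact ⟨this.1, this.2⟩
    have hmem : PySem.Int.mod (pvGetA residues n0 - a * n0) p ∈ PySem.List.pyRange 0 p 1 := by
      rw [PySem.List.mem_pyRange_one]
      exact ⟨PySem.Int.mod_nonneg _ hp, PySem.Int.mod_lt _ hp⟩
    rw [pvLoop3A, pvLoop3Inner_eq residues p a n0 hk0 hp _ hbnd]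
    by_cases hc : pvFitB residues p a (PySem.Int.mod (pvGetA residues n0 - a * n0) p) = true
    · have hc' : pvAllA residues
          (fun n => PySem.Int.mod (a * n + PySem.Int.mod (pvGetA residues n0 - a * n0) p) p) = true :=
        hc
      rw [if_pos ⟨hc', hmem⟩]
      simp [hc]
    · have hc' : ¬ (pvAllA residues
          (fun n => PySem.Int.mod (a * n + PySem.Int.mod (pvGetA residues n0 - a * n0) p) p) = true
          ∧ PySem.Int.mod (pvGetA residues n0 - a * n0) p ∈ PySem.List.pyRange 0 p 1) := by
        intro h
        exact hc h.1
      rw [if_neg hc']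
      rw [Bool.not_eq_true] at hc
      simpa [List.find?_cons, hc] using ih

-- once aff is set the scan just looks for the first b = 0 fit
theorem pvScanB_some_char (residues : List (Int × Int)) (p n0 m0 x y : Int) (as : List Int) :
    pvScanB residues p n0 m0 (some (x, y)) as =
      match as.find? (fun a => pvFitB residues p a (PySem.Int.mod (m0 - a * n0) p) &&
                        (PySem.Int.mod (m0 - a * n0) p == 0)) with
      | some a => some (pvFmt2A a p)
      | none => some (pvFmt3A x y p) := by
  induction as with
  | nil => rfl
  | cons a as ih =>
    by_cases hf : pvFitB residues p a (PySem.Int.mod (m0 - a * n0) p) = true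
    · by_cases hz : (PySem.Int.mod (m0 - a * n0) p == 0) = true
      · simp [pvScanB, hf, hz, pvFmt2A]
      · rw [Bool.not_eq_true] at hz
        simpa [pvScanB, List.find?_cons, hf, hz] using ih
    · rw [Bool.not_eq_true] at hf
      simpa [pvScanB, List.find?_cons, hf] using ih

theorem pvScanB_none_char (residues : List (Int × Int)) (p n0 m0 : Int) (as : List Int) :
    pvScanB residues p n0 m0 none as =
      match as.find? (fun a => pvFitB residues p a (PySem.Int.mod (m0 - a * n0) p) &&
                        (PySem.Int.mod (m0 - a * n0) p == 0)) with
      | some a => some (pvFmt2A a p)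
      | none =>
        match as.find? (fun a => pvFitB residues p a (PySem.Int.mod (m0 - a * n0) p)) with
        | some a => some (pvFmt3A a (PySem.Int.mod (m0 - a * n0) p) p)
        | none => none := by
  induction as with
  | nil => rfl
  | cons a as ih =>
    by_cases hf : pvFitB residues p a (PySem.Int.mod (m0 - a * n0) p) = true
    · by_cases hz : (PySem.Int.mod (m0 - a * n0) p == 0) = true
      · simp [pvScanB, hf, hz, pvFmt2A]
      · rw [Bool.not_eq_true] at hz
        have hstep : pvScanB residues p n0 m0 none (a :: as) =
            pvScanB residues p n0 m0 (some (a, PySem.Int.mod (m0 - a * n0) p)) as := by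
          simp [pvScanB, hf, hz]
        rw [hstep, pvScanB_some_char]
        simp [hf, hz, pvFmt3A]
    · rw [Bool.not_eq_true] at hf
      simpa [pvScanB, List.find?_cons, hf] using ih

theorem pyRange_nonpos (p : Int) (hp : p ≤ 0) : PySem.List.pyRange 0 p 1 = [] := by
  rw [PySem.List.pyRange_one]
  have h0 : (p - 0).toNat = 0 := by omega
  rw [h0]
  rfl

-- ===== VERDICT (by name: the statement is the Claim_ definition above) =====
theorem check_n_relation_spec : Claim_equal_check_n_relation := by
  intro residues p _ hpre
  unfold Spec_check_n_relation
  unfold check_n_relation check_n_relation_alt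
  have hKG : pvKeysB = pvKeysA := rfl
  have hGG : pvGetB = pvGetA := rfl
  simp only [hKG, hGG, pvAllA]
  by_cases h1 : ((pvKeysA residues).all fun n => pvGetA residues n == PySem.Int.mod n p) = true
  · rw [if_pos h1, if_pos h1]
    simp [pvFmt1A]
  · rw [if_neg h1, if_neg h1]
    -- residues is nonempty: on [] the first 'all' is true
    cases residues with
    | nil => exact absurd rfl h1
    | cons q rest =>
      have hk : q.1 ∈ pvKeysA (q :: rest) := by
        unfold pvKeysA
        rw [PySem.List.mem_dedup]
        simp
      cases hkb : pvKeysA (q :: rest) with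
      | nil =>
        rw [hkb] at hk
        exact absurd hk (List.not_mem_nil)
      | cons n0 t =>
        show _ = pvScanB (q :: rest) p n0 (pvGetA (q :: rest) n0) none (PySem.List.pyRange 0 p 1)
        by_cases hp : 0 < p
        · have hk0 : n0 ∈ pvKeysA (q :: rest) := by rw [hkb]; simp
          rw [pvLoop2A_char (q :: rest) p n0 hk0 hp, pvScanB_none_char]
          rw [pvLoop3A_char (q :: rest) p n0 hk0 hp]
          cases (PySem.List.pyRange 0 p 1).find?
              (fun a => pvFitB (q :: rest) p a (PySem.Int.mod (pvGetA (q :: rest) n0 - a * n0) p) &&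
                (PySem.Int.mod (pvGetA (q :: rest) n0 - a * n0) p == 0)) with
          | some a => simp [pvFmt2A]
          | none =>
            cases (PySem.List.pyRange 0 p 1).find?
                (fun a => pvFitB (q :: rest) p a (PySem.Int.mod (pvGetA (q :: rest) n0 - a * n0) p)) with
            | some a => simp [pvFmt3A]
            | none => rfl
        · have hr : PySem.List.pyRange 0 p 1 = [] := pyRange_nonpos p (by omega)
          rw [hr]
          rfl
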